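-- pv_equiv track=rewrite | github.com/yhlleo/DWC-GAN | data_ios/celeba_data.py | collect_all_domains
-- ===== SOURCE A (Python) =====
-- def collect_all_domains(num_attr):
--     domains = ['0', '1']
--     for i in range(1, num_attr):
--         current_domains = []
--         for da in domains:
--             current_domains.extend([da+'0', da+'1'])
--         domains = current_domains
--
--     domains_str2int = []
--     for da in domains:
--         domains_str2int.append([int(v) for v in da])
--     return domains_str2int
-- ===== SOURCE B (Python) =====
-- def collect_all_domains(num_attr):
--     if num_attr <= 1:
--         return [[0], [1]]
--     return [p + [b] for p in collect_all_domains(num_attr - 1) for b in (0, 1)]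
-- ===== Notes on version B (the rewrite author's own statement) =====
-- stated objective: simpler
-- what changed: Replaces the iterative string-doubling loop plus a second reparsing pass (building '0'/'1' strings and converting each char back with int) by a direct recursion on num_attr that extends int vectors, with no string building or reparsing.
import Mathlib
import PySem

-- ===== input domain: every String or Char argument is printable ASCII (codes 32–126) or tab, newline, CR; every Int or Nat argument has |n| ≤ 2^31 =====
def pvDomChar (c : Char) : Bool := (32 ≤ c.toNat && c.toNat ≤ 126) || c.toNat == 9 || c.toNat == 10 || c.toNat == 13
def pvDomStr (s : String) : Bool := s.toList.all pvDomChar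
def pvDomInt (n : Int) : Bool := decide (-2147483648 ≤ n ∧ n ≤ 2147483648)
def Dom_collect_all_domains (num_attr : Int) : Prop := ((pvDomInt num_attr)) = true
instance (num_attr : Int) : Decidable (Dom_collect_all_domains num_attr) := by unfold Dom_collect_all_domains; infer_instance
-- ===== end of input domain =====

-- B replaces A's string-doubling loop + reparse pass by a recursion on num_attr over int vectors (objective: simpler).


-- ===== PORT A =====
-- inner 'for da in domains: extend [da+'0', da+'1']'
def cadStep (domains : List String) : List String :=
  domains.foldl (fun acc da => acc ++ [da ++ "0", da ++ "1"]) []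

-- int(v) for a single char v; exact here since the strings contain only '0'/'1' digits
def cadCharInt (c : Char) : Int := (c.toNat : Int) - 48

def collect_all_domains (num_attr : Int) : List (List Int) :=
  let domains := (PySem.List.pyRange 1 num_attr 1).foldl (fun d _ => cadStep d) ["0", "1"]
  domains.foldl (fun acc da => acc ++ [da.toList.map cadCharInt]) []

-- ===== PORT B =====
def collect_all_domains_alt (num_attr : Int) : List (List Int) :=
  if num_attr ≤ 1 then [[0], [1]]
  else (collect_all_domains_alt (num_attr - 1)).flatMap (fun p => [p ++ [0], p ++ [1]])
termination_by num_attr.toNat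
decreasing_by simp at *; omega

-- ===== PRECONDITION & SPEC =====
def Spec_collect_all_domains (num_attr : Int) (out : List (List Int)) : Prop := out = collect_all_domains_alt num_attr
instance (num_attr : Int) (out : List (List Int)) : Decidable (Spec_collect_all_domains num_attr out) := by unfold Spec_collect_all_domains; infer_instance

-- ===== CLAIM (what is proved, stated in full; the proofs are below) =====
def Claim_equal_collect_all_domains : Prop := ∀ (num_attr : Int), Dom_collect_all_domains num_attr → Spec_collect_all_domains num_attr (collect_all_domains num_attr)

-- ===== LEMMAS AND PROOFS =====

def bstep (L : List (List Int)) : List (List Int) :=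
  L.flatMap (fun p => [p ++ [0], p ++ [1]])

def decStr (da : String) : List Int := da.toList.map cadCharInt

theorem foldl_append_pair {α β : Type} (f g : α → β) :
    ∀ (l : List α) (acc : List β),
      l.foldl (fun acc da => acc ++ [f da, g da]) acc = acc ++ l.flatMap (fun da => [f da, g da]) := by
  intro l
  induction l with
  | nil => simp [List.foldl]
  | cons a t ih => intro acc; rw [List.foldl_cons, ih]; simp [List.flatMap_cons]

theorem foldl_append_one {α β : Type} (f : α → β) :
    ∀ (l : List α) (acc : List β),
      l.foldl (fun acc da => acc ++ [f da]) acc = acc ++ l.map f := by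
  intro l
  induction l with
  | nil => simp [List.foldl]
  | cons a t ih => intro acc; rw [List.foldl_cons, ih]; simp

theorem cadStep_eq (B : List String) :
    cadStep B = B.flatMap (fun da => [da ++ "0", da ++ "1"]) := by
  unfold cadStep; rw [foldl_append_pair]; exact List.nil_append _

theorem decStr_append (da d : String) :
    decStr (da ++ d) = decStr da ++ decStr d := by
  simp [decStr]

theorem map_dec_cadStep (B : List String) :
    (cadStep B).map decStr = bstep (B.map decStr) := by
  rw [cadStep_eq, bstep, List.map_flatMap, List.flatMap_map]
  have h : ∀ da : String, List.map decStr [da ++ "0", da ++ "1"]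
      = [decStr da ++ [0], decStr da ++ [1]] := by
    intro da
    rw [List.map_cons, List.map_cons, List.map_nil, decStr_append, decStr_append]
    rfl
  simp only [h]

theorem map_dec_iter (k : Nat) (B : List String) :
    (cadStep^[k] B).map decStr = bstep^[k] (B.map decStr) := by
  induction k generalizing B with
  | zero => rfl
  | succ k ih => simp only [Function.iterate_succ_apply]; rw [ih, map_dec_cadStep]

theorem foldl_cadStep {α : Type} (l : List α) (s : List String) :
    l.foldl (fun d _ => cadStep d) s = cadStep^[l.length] s := by
  induction l generalizing s with
  | nil => rfl
  | cons a t ih => rw [List.foldl_cons, ih]; rfl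

theorem alt_eq_iter (num_attr : Int) :
    collect_all_domains_alt num_attr = bstep^[(num_attr - 1).toNat] [[0], [1]] := by
  generalize hk : (num_attr - 1).toNat = k
  induction k generalizing num_attr with
  | zero =>
    rw [collect_all_domains_alt]
    have h : num_attr ≤ 1 := by omega
    simp [h]
  | succ k ih =>
    rw [collect_all_domains_alt]
    have h : ¬ num_attr ≤ 1 := by omega
    simp only [h, if_false]
    rw [ih (num_attr - 1) (by omega), Function.iterate_succ_apply']
    rfl

-- ===== VERDICT (by name: the statement is the Claim_ definition above) =====
theorem collect_all_domains_spec : Claim_equal_collect_all_domains := by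
  intro num_attr _
  show _ = _
  rw [collect_all_domains, alt_eq_iter]
  rw [foldl_append_one, foldl_cadStep, PySem.List.length_pyRange_one, List.nil_append]
  have := map_dec_iter (num_attr - 1).toNat ["0", "1"]
  simpa [decStr] using this
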